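-- pv_equiv track=rewrite | github.com/knuutti/data-structures-and-algorithms | Exercises/changes.py | changes
-- ===== SOURCE A (Python) =====
-- def changes(A):
--     x = 0
--     i = 0
--     while i < len(A)-1:
--         if A[i] == A[i+1]:
--             if i < len(A)-2 and A[i+1] == A[i+2]:
--                 i = i + 1
--             x = x + 1
--         i = i + 1
--     return x
-- ===== SOURCE B (Python) =====
-- def changes(A):
--     # Sum floor(runlength/2) over maximal runs of consecutive equal elements.
--     if len(A) == 0:
--         return 0
--     total = 0
--     run = 1
--     cur = A[0]
--     for v in A[1:]:
--         if v == cur: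
--             run += 1
--         else:
--             total += run // 2
--             cur = v
--             run = 1
--     return total + run // 2
-- ===== Notes on version B (the rewrite author's own statement) =====
-- stated objective: idiomatic
-- what changed: Replaces the skip-pointer index loop with a single run-length grouping pass that adds len(run)//2 per maximal run of equal elements.
import Mathlib
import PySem

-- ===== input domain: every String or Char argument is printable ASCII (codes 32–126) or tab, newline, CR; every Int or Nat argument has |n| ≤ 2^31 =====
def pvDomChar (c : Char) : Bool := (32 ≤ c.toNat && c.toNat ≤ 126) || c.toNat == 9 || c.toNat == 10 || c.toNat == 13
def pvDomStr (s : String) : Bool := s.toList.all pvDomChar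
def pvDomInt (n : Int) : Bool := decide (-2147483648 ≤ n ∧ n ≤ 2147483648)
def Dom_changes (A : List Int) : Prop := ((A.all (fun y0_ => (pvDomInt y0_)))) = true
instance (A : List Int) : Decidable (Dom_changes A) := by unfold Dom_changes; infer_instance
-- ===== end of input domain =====

-- B replaces A's skip-pointer index loop with a single run-length grouping pass (idiomatic, same cost).

-- ===== PORT A =====
-- A's while loop; i starts at 0 and only increases, so it is a Nat index; the guards
-- keep i, i+1 (resp. i+2) strictly below A.length, so getD's default 0 is never used
def changesLoop (A : List Int) (fuel : Nat) (i : Nat) (x : Int) : Int :=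
  match fuel with
  | 0 => x
  | fuel + 1 =>
    if i < A.length - 1 then
      if A.getD i 0 = A.getD (i+1) 0 then
        if i < A.length - 2 ∧ A.getD (i+1) 0 = A.getD (i+2) 0 then
          changesLoop A fuel (i+2) (x+1)
        else
          changesLoop A fuel (i+1) (x+1)
      else
        changesLoop A fuel (i+1) x
    else x

-- fuel A.length bounds the loop's iteration count (i increases every iteration)
def changes (A : List Int) : Int := changesLoop A A.length 0 0

-- ===== PORT B =====
-- B's for-loop: cur = current run's value, run = its length so far, total = sum so far
def changesGo (t : List Int) (cur : Int) (run : Int) (total : Int) : Int :=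
  match t with
  | [] => total + PySem.Int.floordiv run 2
  | v :: t' =>
    if v = cur then changesGo t' cur (run + 1) total
    else changesGo t' v 1 (total + PySem.Int.floordiv run 2)

def changes_alt (A : List Int) : Int :=
  match A with
  | [] => 0
  | a :: t => changesGo t a 1 0

-- ===== PRECONDITION & SPEC =====
def Spec_changes (A : List Int) (out : Int) : Prop := out = changes_alt A
instance (A : List Int) (out : Int) : Decidable (Spec_changes A out) := by unfold Spec_changes; infer_instance

-- ===== CLAIM (what is proved, stated in full; the proofs are below) =====
def Claim_equal_changes : Prop := ∀ (A : List Int), Dom_changes A → Spec_changes A (changes A)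

-- ===== LEMMAS AND PROOFS =====

-- ghost function: the value contributed by A's loop on the remaining suffix of the list
def gA : List Int → Int
  | a :: b :: c :: t => if a = b then (if b = c then 1 + gA (c :: t) else 1 + gA (b :: c :: t)) else gA (b :: c :: t)
  | [a, b] => if a = b then 1 else 0
  | _ => 0

theorem gA_short (l : List Int) (h : l.length ≤ 1) : gA l = 0 := by
  match l with
  | [] => rfl
  | [a] => rfl
  | a :: b :: t => simp at h

theorem gA_ne (a b : Int) (t : List Int) (h : ¬ a = b) : gA (a :: b :: t) = gA (b :: t) := by
  match t with
  | [] => simp [gA, h]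
  | c :: t'' => simp [gA, h]

theorem floordiv_add_two (k : Int) : PySem.Int.floordiv (k + 2) 2 = PySem.Int.floordiv k 2 + 1 := by
  have h1 := PySem.Int.floordiv_mul_add_mod k 2
  have h2 := PySem.Int.floordiv_mul_add_mod (k + 2) 2
  have m1a : 0 ≤ PySem.Int.mod k 2 := PySem.Int.mod_nonneg _ (by omega)
  have m1b : PySem.Int.mod k 2 < 2 := PySem.Int.mod_lt _ (by omega)
  have m2a : 0 ≤ PySem.Int.mod (k + 2) 2 := PySem.Int.mod_nonneg _ (by omega)
  have m2b : PySem.Int.mod (k + 2) 2 < 2 := PySem.Int.mod_lt _ (by omega)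
  omega

theorem changesGo_acc (t : List Int) : ∀ cur run total,
    changesGo t cur run total = total + changesGo t cur run 0 := by
  induction t with
  | nil => intro cur run total; simp [changesGo]
  | cons v t' ih =>
    intro cur run total
    simp only [changesGo]
    by_cases h : v = cur
    · simp only [if_pos h]
      exact ih cur (run + 1) total
    · simp only [if_neg h]
      rw [ih v 1 (total + PySem.Int.floordiv run 2), ih v 1 (0 + PySem.Int.floordiv run 2)]
      ring

theorem changesGo_shift (t : List Int) : ∀ cur run,
    changesGo t cur (run + 2) 0 = 1 + changesGo t cur run 0 := by
  induction t with
  | nil =>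
    intro cur run
    simp only [changesGo, floordiv_add_two]
    ring
  | cons v t' ih =>
    intro cur run
    simp only [changesGo]
    by_cases h : v = cur
    · simp only [if_pos h]
      have e : run + 2 + 1 = (run + 1) + 2 := by ring
      rw [e, ih]
    · simp only [if_neg h, floordiv_add_two]
      rw [changesGo_acc t' v 1 (0 + (PySem.Int.floordiv run 2 + 1)),
          changesGo_acc t' v 1 (0 + PySem.Int.floordiv run 2)]
      ring

-- B's pass started on value cur with run length 1 computes gA (cur :: t)
theorem go_eq_gA : ∀ n (t : List Int), t.length ≤ n → ∀ cur, changesGo t cur 1 0 = gA (cur :: t) := by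
  intro n
  induction n with
  | zero =>
    intro t ht cur
    have : t = [] := by cases t <;> simp_all
    subst this; rfl
  | succ n ih =>
    intro t ht cur
    match t with
    | [] => rfl
    | b :: t' =>
      have ht' : t'.length ≤ n := by simp at ht; omega
      simp only [changesGo]
      by_cases hbc : b = cur
      · subst hbc
        have hshift : changesGo t' b (1 + 1) 0 = 1 + changesGo t' b 0 0 := by
          have e : (1 : Int) + 1 = 0 + 2 := by ring
          rw [e, changesGo_shift]
        rw [hshift]
        have hf0 : PySem.Int.floordiv 0 2 = 0 := by decide
        match t' with
        | [] => simp [changesGo, gA]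
        | c :: t'' =>
          have ht'' : t''.length ≤ n := by simp at ht'; omega
          simp only [changesGo]
          by_cases hc : c = b
          · subst hc
            have h01 : (0 : Int) + 1 = 1 := by ring
            rw [h01, ih t'' ht'' c]
            simp [gA]
          · simp only [if_neg hc]
            rw [hf0]
            have h00 : (0 : Int) + 0 = 0 := by ring
            rw [h00, ih t'' ht'' c]
            have hne : ¬ b = c := fun e => hc e.symm
            rw [show gA (b :: b :: c :: t'') = 1 + gA (b :: c :: t'') by simp [gA, hne],
                gA_ne b c t'' hne]
            simp
      · simp only [if_neg hbc]
        have h1 : PySem.Int.floordiv 1 2 = 0 := by decide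
        rw [h1]
        have h00 : (0 : Int) + 0 = 0 := by ring
        rw [h00, ih t' ht' b]
        exact (gA_ne cur b t' (fun e => hbc e.symm)).symm

theorem loop_eq (A : List Int) : ∀ k i x, A.length - i ≤ k + 1 → changesLoop A k i x = x + gA (A.drop i) := by
  intro k
  induction k with
  | zero =>
    intro i x hk
    rw [changesLoop]
    rw [gA_short (A.drop i) (by simp; omega)]
    ring
  | succ k ih =>
    intro i x hk
    by_cases hg : i < A.length - 1
    · have hi0 : i < A.length := by omega
      have hi1 : i + 1 < A.length := by omega
      have d0 : A.drop i = A[i] :: A.drop (i+1) := List.drop_eq_getElem_cons hi0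
      have d1 : A.drop (i+1) = A[i+1] :: A.drop (i+2) := List.drop_eq_getElem_cons hi1
      have g0 : A.getD i 0 = A[i] := List.getD_eq_getElem A 0 hi0
      have g1 : A.getD (i+1) 0 = A[i+1] := List.getD_eq_getElem A 0 hi1
      rw [changesLoop, if_pos hg]
      by_cases h1 : A.getD i 0 = A.getD (i+1) 0
      · rw [if_pos h1]
        by_cases h2 : i < A.length - 2 ∧ A.getD (i+1) 0 = A.getD (i+2) 0
        · rw [if_pos h2]
          have hi2 : i + 2 < A.length := by omega
          have d2 : A.drop (i+2) = A[i+2] :: A.drop (i+3) := List.drop_eq_getElem_cons hi2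
          have g2 : A.getD (i+2) 0 = A[i+2] := List.getD_eq_getElem A 0 hi2
          rw [ih (i+2) (x+1) (by omega)]
          rw [d0, d1, d2]
          rw [gA]
          rw [if_pos (by rw [← g0, ← g1]; exact h1)]
          rw [if_pos (by rw [← g1, ← g2]; exact h2.2)]
          ring
        · rw [if_neg h2]
          rw [ih (i+1) (x+1) (by omega)]
          by_cases h3 : i + 2 < A.length
          · have hne2 : ¬ A.getD (i+1) 0 = A.getD (i+2) 0 := fun e => h2 ⟨by omega, e⟩
            have d2 : A.drop (i+2) = A[i+2] :: A.drop (i+3) := List.drop_eq_getElem_cons h3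
            have g2 : A.getD (i+2) 0 = A[i+2] := List.getD_eq_getElem A 0 h3
            rw [d0, d1, d2, gA]
            rw [if_pos (by rw [← g0, ← g1]; exact h1)]
            rw [if_neg (by rw [← g1, ← g2]; exact hne2)]
            rw [← d2, ← d1]
            ring
          · have hemp : A.drop (i+2) = [] := List.drop_eq_nil_of_le (by omega)
            rw [d0, d1, hemp]
            rw [gA, if_pos (by rw [← g0, ← g1]; exact h1)]
            rw [gA_short [A[i+1]] (by simp)]
            ring
      · rw [if_neg h1]
        rw [ih (i+1) x (by omega)]
        rw [d0, d1, gA_ne _ _ _ (by rw [← g0, ← g1]; exact h1), ← d1]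
    · rw [changesLoop, if_neg hg]
      rw [gA_short (A.drop i) (by simp; omega)]
      ring

theorem changes_eq_gA (A : List Int) : changes A = gA A := by
  have := loop_eq A A.length 0 0 (by omega)
  simpa [changes] using this

theorem changes_alt_eq_gA (A : List Int) : changes_alt A = gA A := by
  match A with
  | [] => rfl
  | a :: t => exact go_eq_gA t.length t le_rfl a

-- ===== VERDICT (by name: the statement is the Claim_ definition above) =====
theorem changes_spec : Claim_equal_changes := by
  intro A _
  unfold Spec_changes
  rw [changes_eq_gA, changes_alt_eq_gA]
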